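/- GENERATED by tools/from_farm_form.py from prooffarm-gif/accepted/DGifGetImageDesc.1/Proof.lean (a worked proof of the farm's unit `DGifGetImageDesc.1`,
   accepted by the verdict) — do not edit. -/
import Gif.Spec.Units.DGifGetImageDesc_1
import Gif.Spec.AllSegs
import Gif.Spec.Proved.DGifGetImageDesc_1_Lemmas

open X86 X86.User Asan ProgX.Base ProgX.Base.Spec Gif.Spec

/-!
  `DGifGetImageDesc.1` (0x109460 … 0x10949a and 0x1094a7 … 0x1094b5, 24 instructions; dgif_lib.c:430-440): THE FIRST SEGMENT OF AN
  UNPROTECTED FUNCTION, with a call (DGifGetImageHeader) near its end. The call's return address 0x1094af (`ret4`) is not a cut of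
  the design, so the unit makes it one of its own: a private assertion `gid1_AtRet4` (`At` for the callee's heap and forest + the
  callee's result clauses) and two walks (Lemmas.lean), chained here.
-/

/-- Segment 1 of `DGifGetImageDesc` takes the function's entry to `Mid` at 0x1094b5 (GIF_OK) or `Done` at 0x10949a (GIF_ERROR). -/
theorem Gif.Spec.Proved.DGifGetImageDesc_1_ok : Gif.Spec.DGifGetImageDesc_1.Statement := by
  intro Lay hLay μ hμ u₀ hcode h_Header h_load8 h_load4 _h_store4 H rest frames F R e ret he hpre
  -- the callee's contract for the entry's heap, forest and frames (the function has no protected frame)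
  have hgh := h_Header H rest frames F R
  -- 0x109460 … the call … 0x1094af
  refine (Gif.Spec.DGifGetImageDesc_1.gid1_seg_call Lay hLay μ hμ u₀ hcode H rest frames F R e ret hgh h_load8 h_load4
    he hpre).trans ?_
  -- 0x1094af … 0x1094b5 | 0x10949a
  intro v1 hv1
  obtain ⟨Hc, Fc, hat⟩ := hv1
  refine (Gif.Spec.DGifGetImageDesc_1.gid1_seg_tail Lay hLay μ hμ u₀ hcode H rest frames F R e ret Hc Fc v1 hat).mono ?_
  intro w hw
  rcases hw with hmid | hdone
  · exact Or.inl ⟨Hc, Fc, hmid⟩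
  · exact Or.inr ⟨Hc, Fc, hdone⟩
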